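-- pv_equiv track=rewrite | github.com/MarcDcls/Megabot | upg_planning.py | compute_traj_down
-- ===== SOURCE A (Python) =====
-- DSTEP = 10
--
-- def compute_traj_down(leg_pos):
--     traj = [[leg_pos[0], leg_pos[1], leg_pos[2] - DSTEP]]
--     while traj[-1][2] > 0:
--         new_z = traj[-1][2] - DSTEP
--         if new_z < 0:
--             new_z = 0
--         traj.append([traj[0][0], traj[0][1], new_z])
--     return traj
-- ===== SOURCE B (Python) =====
-- DSTEP = 10
--
-- def compute_traj_down(leg_pos):
--     x, y = leg_pos[0], leg_pos[1]
--     v1 = leg_pos[2] - DSTEP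
--     if v1 <= 0:
--         return [[x, y, v1]]
--     n = (v1 + DSTEP - 1) // DSTEP + 1
--     return [[x, y, max(0, v1 - DSTEP * i)] for i in range(n)]
-- ===== Notes on version B (the rewrite author's own statement) =====
-- stated objective: simpler
-- what changed: Replaced the condition-driven while loop that appends to a growing list with a closed-form length computation (ceil division) and a single comprehension producing element i as max(0, v1 - DSTEP*i).
-- outside the precondition, e.g. on compute_traj_down([5, 6]): A raises IndexError, B raises IndexError
import Mathlib
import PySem

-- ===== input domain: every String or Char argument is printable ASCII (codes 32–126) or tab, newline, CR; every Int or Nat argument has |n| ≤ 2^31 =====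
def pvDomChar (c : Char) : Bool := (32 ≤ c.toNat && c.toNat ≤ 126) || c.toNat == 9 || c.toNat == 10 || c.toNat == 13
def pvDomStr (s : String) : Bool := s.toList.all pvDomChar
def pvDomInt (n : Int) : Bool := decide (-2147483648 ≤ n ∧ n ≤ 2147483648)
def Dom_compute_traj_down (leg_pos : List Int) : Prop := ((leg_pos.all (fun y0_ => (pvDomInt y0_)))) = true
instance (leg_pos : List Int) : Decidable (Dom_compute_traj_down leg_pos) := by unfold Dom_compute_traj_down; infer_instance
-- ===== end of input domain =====

-- B replaces A's condition-driven while loop by a closed-form length (ceil division) and one map; objective: simpler.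

-- ===== PORT A =====
-- the while loop of A: given the shared x,y and the z of the current last element,
-- produce the elements appended after it
def ctdLoop (x y : Int) (z : Int) : List (List Int) :=
  if h : z > 0 then
    let new_z := if z - 10 < 0 then 0 else z - 10
    [x, y, new_z] :: ctdLoop x y new_z
  else []
termination_by z.toNat
decreasing_by
  split <;> omega

def compute_traj_down (leg_pos : List Int) : List (List Int) :=
  let x := (PySem.List.pyGet? leg_pos 0).getD 0   -- Pre_ guarantees the index is in range
  let y := (PySem.List.pyGet? leg_pos 1).getD 0
  let z := (PySem.List.pyGet? leg_pos 2).getD 0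
  [x, y, z - 10] :: ctdLoop x y (z - 10)

-- ===== PORT B =====
def compute_traj_down_alt (leg_pos : List Int) : List (List Int) :=
  let x := (PySem.List.pyGet? leg_pos 0).getD 0
  let y := (PySem.List.pyGet? leg_pos 1).getD 0
  let v1 := (PySem.List.pyGet? leg_pos 2).getD 0 - 10
  if v1 ≤ 0 then [[x, y, v1]]
  else
    let n := (PySem.Int.floordiv (v1 + 10 - 1) 10 + 1).toNat
    (List.range n).map (fun (i : Nat) => [x, y, max 0 (v1 - 10 * (i : Int))])

-- ===== PRECONDITION & SPEC =====
-- Pre_ excludes exactly the lists with fewer than 3 elements, on which Python A raises IndexError.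
def Pre_compute_traj_down (leg_pos : List Int) : Prop := 3 ≤ leg_pos.length
instance (leg_pos : List Int) : Decidable (Pre_compute_traj_down leg_pos) := by unfold Pre_compute_traj_down; infer_instance
def pvWitness_compute_traj_down : List Int := [1, 2, 25]

def Spec_compute_traj_down (leg_pos : List Int) (out : List (List Int)) : Prop := out = compute_traj_down_alt leg_pos
instance (leg_pos : List Int) (out : List (List Int)) : Decidable (Spec_compute_traj_down leg_pos out) := by unfold Spec_compute_traj_down; infer_instance

-- ===== CLAIM (what is proved, stated in full; the proofs are below) =====
def Claim_equal_compute_traj_down : Prop := ∀ (leg_pos : List Int), Dom_compute_traj_down leg_pos → Pre_compute_traj_down leg_pos → Spec_compute_traj_down leg_pos (compute_traj_down leg_pos)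

-- ===== LEMMAS AND PROOFS =====

lemma ctdLoop_key (x y : Int) : ∀ (k : Nat) (v : Int), v.toNat ≤ k → 0 < v →
    [x, y, v] :: ctdLoop x y v
      = (List.range ((PySem.Int.floordiv (v + 10 - 1) 10 + 1).toNat)).map
          (fun (i : Nat) => [x, y, max 0 (v - 10 * (i : Int))]) := by
  intro k
  induction k with
  | zero => intro v hv h0; omega
  | succ k ih =>
    intro v hv h0
    rw [PySem.Int.floordiv_eq_ediv_of_pos (by norm_num)]
    have hq1 : 1 ≤ (v + 10 - 1) / 10 := by omega
    have hn : ((v + 10 - 1) / 10 + 1).toNat = ((v + 10 - 1) / 10).toNat + 1 := by omega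
    rw [hn, List.range_succ_eq_map, List.map_cons, List.map_map]
    have hmax : max 0 (v - 10 * ((0 : Nat) : Int)) = v := by simp; omega
    rw [hmax]
    rw [ctdLoop, dif_pos h0]
    by_cases hle : v ≤ 10
    · have hz : (if v - 10 < 0 then (0:Int) else v - 10) = 0 := by split <;> omega
      have hnil : ctdLoop x y 0 = [] := by rw [ctdLoop]; simp
      have hq : ((v + 10 - 1) / 10).toNat = 1 := by omega
      rw [hz]
      simp only [hnil, hq]
      simp
      omega
    · have hz : (if v - 10 < 0 then (0:Int) else v - 10) = v - 10 := by split <;> omega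
      have := ih (v - 10) (by omega) (by omega)
      rw [PySem.Int.floordiv_eq_ediv_of_pos (by norm_num)] at this
      have hqeq : ((v - 10 + 10 - 1) / 10 + 1).toNat = ((v + 10 - 1) / 10).toNat := by omega
      rw [hqeq] at this
      simp only [hz]
      rw [this]
      congr 1
      apply List.map_congr_left
      intro i _
      have : v - 10 - 10 * (i : Int) = v - 10 * ((i : Int) + 1) := by ring
      simp [Function.comp, this]

-- ===== VERDICT (by name: the statement is the Claim_ definition above) =====
theorem compute_traj_down_spec : Claim_equal_compute_traj_down := by
  intro leg_pos _ _
  unfold Spec_compute_traj_down compute_traj_down compute_traj_down_alt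
  set x := (PySem.List.pyGet? leg_pos 0).getD 0
  set y := (PySem.List.pyGet? leg_pos 1).getD 0
  set z := (PySem.List.pyGet? leg_pos 2).getD 0
  by_cases h : z - 10 ≤ 0
  · simp only [h, if_pos]
    rw [ctdLoop]
    simp only [show ¬ (z - 10 > 0) by omega]
    simp
  · simp only [h, if_neg, not_false_iff]
    exact ctdLoop_key x y (z - 10).toNat (z - 10) le_rfl (by omega)
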